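-- pv_equiv track=rewrite | github.com/SELGroup/HISEvent | hierarchical_SE.py | get_split_edges_obsolete
-- ===== SOURCE A (Python) =====
-- def get_split_edges_obsolete(cluster_edges, splits):
--     splits_edges = []
--     for split in splits:
--         s = split[0] + 1 # node indexing starts from 1
--         e = split[1]
--         edges = [edge for edge in cluster_edges if (edge[0] >= s and edge[1] <= e)]
--         mapped_edges = [(edge[0]-split[0], edge[1]-split[0]) for edge in edges] # map so that the node indexing of each split starts from 1
--         splits_edges.append(mapped_edges)
--     return splits_edges
-- ===== SOURCE B (Python) =====
-- def get_split_edges_obsolete(cluster_edges, splits):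
--     # Sort the edges once by source endpoint (keeping original positions); for each
--     # split, binary-search the first candidate with edge[0] >= lo+1, filter the tail
--     # by edge[1] <= hi, and restore the original edge order by sorting on position.
--     indexed = sorted(enumerate(cluster_edges), key=lambda t: t[1][0])
--     starts = [e[0] for _, e in indexed]
--
--     def bisect_left(a, x):
--         lo, hi = 0, len(a)
--         while lo < hi:
--             mid = (lo + hi) // 2
--             if a[mid] < x:
--                 lo = mid + 1
--             else:
--                 hi = mid
--         return lo
--
--     out = []
--     for lo, hi in splits:
--         cand = [t for t in indexed[bisect_left(starts, lo + 1):] if t[1][1] <= hi]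
--         cand.sort(key=lambda t: t[0])
--         out.append([(e[0] - lo, e[1] - lo) for _, e in cand])
--     return out
-- ===== Notes on version B (the rewrite author's own statement) =====
-- stated objective: alternative
-- what changed: Instead of A's full filter pass over all edges per split, B sorts the edges once by source endpoint, binary-searches each split's start threshold so only the qualifying tail is scanned, and restores the original edge order by sorting the matches on their original position.
import Mathlib
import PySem

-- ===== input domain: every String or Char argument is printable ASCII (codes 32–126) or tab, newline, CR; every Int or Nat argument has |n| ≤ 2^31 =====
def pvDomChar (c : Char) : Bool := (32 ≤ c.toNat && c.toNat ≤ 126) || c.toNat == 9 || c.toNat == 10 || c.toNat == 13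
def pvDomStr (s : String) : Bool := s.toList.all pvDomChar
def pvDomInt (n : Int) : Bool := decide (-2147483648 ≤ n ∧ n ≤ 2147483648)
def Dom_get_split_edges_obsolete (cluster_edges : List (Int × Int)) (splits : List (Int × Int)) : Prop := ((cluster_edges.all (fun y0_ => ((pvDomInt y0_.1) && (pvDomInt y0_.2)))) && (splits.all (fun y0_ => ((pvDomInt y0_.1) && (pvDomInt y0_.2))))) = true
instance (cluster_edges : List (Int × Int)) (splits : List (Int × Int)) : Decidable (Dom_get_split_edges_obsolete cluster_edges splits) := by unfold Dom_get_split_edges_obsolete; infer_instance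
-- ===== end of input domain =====

-- B replaces A's per-split full filter pass with: sort the edges once by source endpoint,
-- binary-search each split's start threshold, filter the tail, and restore the original
-- edge order by sorting matches on their original position (objective: alternative).


-- ===== PORT A =====
def get_split_edges_obsolete (cluster_edges : List (Int × Int)) (splits : List (Int × Int)) : List (List (Int × Int)) :=
  splits.foldl (fun splits_edges split =>
    let s := split.1 + 1
    let e := split.2
    let edges := cluster_edges.filter (fun edge => edge.1 ≥ s && edge.2 ≤ e)
    let mapped_edges := edges.map (fun edge => (edge.1 - split.1, edge.2 - split.1))
    splits_edges ++ [mapped_edges]) []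

-- ===== PORT B =====
-- Source B's hand-written bisect_left loop is exactly PySem.List.bisectLeft (ported per PYSEM.md)
def get_split_edges_obsolete_alt (cluster_edges : List (Int × Int)) (splits : List (Int × Int)) : List (List (Int × Int)) :=
  let indexed := PySem.List.sorted (PySem.List.enumerate cluster_edges) (fun t => t.2.1)
  let starts := indexed.map (fun t => t.2.1)
  splits.foldl (fun out sp =>
    let cand := (indexed.drop (PySem.List.bisectLeft starts (sp.1 + 1))).filter (fun t => t.2.2 ≤ sp.2)
    let cand := PySem.List.sorted cand (fun t => t.1)
    out ++ [cand.map (fun t => (t.2.1 - sp.1, t.2.2 - sp.1))]) []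

-- ===== PRECONDITION & SPEC =====
def Spec_get_split_edges_obsolete (cluster_edges : List (Int × Int)) (splits : List (Int × Int)) (out : List (List (Int × Int))) : Prop := out = get_split_edges_obsolete_alt cluster_edges splits
instance (cluster_edges : List (Int × Int)) (splits : List (Int × Int)) (out : List (List (Int × Int))) : Decidable (Spec_get_split_edges_obsolete cluster_edges splits out) := by unfold Spec_get_split_edges_obsolete; infer_instance

-- ===== CLAIM (what is proved, stated in full; the proofs are below) =====
def Claim_equal_get_split_edges_obsolete : Prop := ∀ (cluster_edges : List (Int × Int)) (splits : List (Int × Int)), Dom_get_split_edges_obsolete cluster_edges splits → Spec_get_split_edges_obsolete cluster_edges splits (get_split_edges_obsolete cluster_edges splits)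

-- ===== LEMMAS AND PROOFS =====

-- if the first k elements of l all have key < x and the rest all have key ≥ x,
-- then dropping k is the same as filtering by x ≤ key
theorem pv_drop_eq_filter {α : Type} (l : List α) (key : α → Int) (x : Int) (k : Nat)
    (hk : k ≤ l.length)
    (h1 : ∀ j (hj : j < l.length), j < k → key l[j] < x)
    (h2 : ∀ j (hj : j < l.length), k ≤ j → x ≤ key l[j]) :
    l.drop k = l.filter (fun t => decide (x ≤ key t)) := by
  have htake : ∀ y ∈ l.take k, key y < x := by
    intro y hy
    obtain ⟨i, hi, rfl⟩ := List.mem_iff_getElem.mp hy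
    have hik : i < k := lt_of_lt_of_le hi (by simp)
    have hil : i < l.length := lt_of_lt_of_le hik hk
    have := h1 i hil hik
    simpa [List.getElem_take] using this
  have hdrop : ∀ y ∈ l.drop k, x ≤ key y := by
    intro y hy
    obtain ⟨i, hi, rfl⟩ := List.mem_iff_getElem.mp hy
    have hkl : k + i < l.length := by
      have := hi; simp [List.length_drop] at this; omega
    have := h2 (k + i) hkl (Nat.le_add_right _ _)
    simpa [List.getElem_drop] using this
  conv_rhs => rw [← List.take_append_drop k l]
  rw [List.filter_append]
  rw [List.filter_eq_nil_iff.mpr (by intro a ha; simpa using not_le.mpr (htake a ha))]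
  rw [List.filter_eq_self.mpr (by intro a ha; simpa using hdrop a ha)]
  simp

-- filtering/projecting an enumeration by a predicate/function of the element only
theorem pv_enumerate_filter_map {α β : Type} (xs : List α) (s : Int) (p : α → Bool) (f : α → β) :
    ((PySem.List.enumerate xs s).filter (fun t => p t.2)).map (fun t => f t.2)
      = (xs.filter p).map f := by
  induction xs generalizing s with
  | nil => rfl
  | cons x tl ih =>
    rw [PySem.List.enumerate_cons]
    by_cases h : p x <;> simp [h, ih]

-- the per-split body of B computes exactly the per-split body of A
theorem pv_split_body (cluster_edges : List (Int × Int)) (sp : Int × Int) :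
    let indexed := PySem.List.sorted (PySem.List.enumerate cluster_edges) (fun t => t.2.1)
    let starts := indexed.map (fun t => t.2.1)
    (PySem.List.sorted ((indexed.drop (PySem.List.bisectLeft starts (sp.1 + 1))).filter
        (fun t => t.2.2 ≤ sp.2)) (fun t => t.1)).map (fun t => (t.2.1 - sp.1, t.2.2 - sp.1))
      = (cluster_edges.filter (fun edge => edge.1 ≥ sp.1 + 1 && edge.2 ≤ sp.2)).map
          (fun edge => (edge.1 - sp.1, edge.2 - sp.1)) := by
  intro indexed starts
  have hpw : indexed.Pairwise (fun a b => a.2.1 ≤ b.2.1) :=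
    PySem.List.sorted_pairwise _ _
  have hpws : starts.Pairwise (· ≤ ·) := by
    unfold starts; exact List.pairwise_map.mpr hpw
  obtain ⟨hk, h1, h2⟩ := PySem.List.bisectLeft_spec starts (sp.1 + 1) hpws
  have hlen : starts.length = indexed.length := by simp [starts]
  -- drop = filter by the start threshold
  have hdrop : indexed.drop (PySem.List.bisectLeft starts (sp.1 + 1))
      = indexed.filter (fun t => decide (sp.1 + 1 ≤ t.2.1)) := by
    apply pv_drop_eq_filter
    · omega
    · intro j hj hjk
      have hj' : j < starts.length := by omega
      have := h1 j hj' hjk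
      simpa [starts] using this
    · intro j hj hjk
      have hj' : j < starts.length := by omega
      have := h2 j hj' hjk
      simpa [starts] using this
  rw [hdrop, List.filter_filter]
  -- name the combined filter over the enumeration
  have hperm : ((PySem.List.enumerate cluster_edges 0).filter
        (fun t => decide (sp.1 + 1 ≤ t.2.1) && decide (t.2.2 ≤ sp.2))).Perm
      (indexed.filter (fun t => decide (t.2.2 ≤ sp.2) && decide (sp.1 + 1 ≤ t.2.1))) := by
    have : (indexed.filter (fun t => decide (t.2.2 ≤ sp.2) && decide (sp.1 + 1 ≤ t.2.1)))
        = indexed.filter (fun t => decide (sp.1 + 1 ≤ t.2.1) && decide (t.2.2 ≤ sp.2)) := by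
      apply List.filter_congr; intro a _; simp [Bool.and_comm]
    rw [this]
    exact (List.Perm.filter _ (PySem.List.sorted_perm _ _ _)).symm
  have hpwf : ((PySem.List.enumerate cluster_edges 0).filter
        (fun t => decide (sp.1 + 1 ≤ t.2.1) && decide (t.2.2 ≤ sp.2))).Pairwise
      (fun a b => a.1 < b.1) :=
    (PySem.List.pairwise_lt_enumerate cluster_edges 0).filter _
  rw [PySem.List.sorted_eq_of_perm_of_pairwise_lt _ _ _ hperm hpwf]
  have := pv_enumerate_filter_map cluster_edges 0
      (fun e => decide (sp.1 + 1 ≤ e.1) && decide (e.2 ≤ sp.2))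
      (fun e => (e.1 - sp.1, e.2 - sp.1))
  simpa [ge_iff_le] using this

-- ===== VERDICT (by name: the statement is the Claim_ definition above) =====
theorem get_split_edges_obsolete_spec : Claim_equal_get_split_edges_obsolete := by
  intro cluster_edges splits _
  unfold Spec_get_split_edges_obsolete get_split_edges_obsolete get_split_edges_obsolete_alt
  rw [PySem.List.foldl_append_singleton_eq_map, PySem.List.foldl_append_singleton_eq_map]
  simp only [List.nil_append]
  exact (List.map_congr_left (fun sp _ => (pv_split_body cluster_edges sp).symm))
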